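-- pv_equiv track=rewrite | github.com/clincoln8/datcom-data | scripts/pharmgkb/drug_gene_relations/pharm.py | get_compound_type
-- ===== SOURCE A (Python) =====
-- def get_compound_type(compound_types):
--     """Returns mcf value format of the typeOf property for a compound.
--
--     This is applied to the 'Type' entry of each row of drugs_df.
--
--     Args:
--         compound_types: string of comma separated list of type values
--
--     Returns:
--         If the compound is of a drug type, then typeOf value should be dcs:Drug
--         Otherwise the typeOf should be dcid:ChemicalCompound
--         If the list contains both drug types and non drug types, then the typeOf
--         should be dcid:ChemicalCompound,dcid:Drug
--     """
--
--     drug_types = ['Drug', 'Drug Class', 'Prodrug']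
--     types = set()
--     for compound_type in compound_types.split(','):
--         compound_type = compound_type.replace('"', '').strip()
--         if compound_type in drug_types:
--             types.add('dcid:Drug')
--         else:
--             types.add('dcid:ChemicalCompound')
--     if len(types) == 2:
--         return 'dcs:ChemicalCompound,dcs:Drug'
--     return types.pop()
-- ===== SOURCE B (Python) =====
-- def get_compound_type(compound_types):
--     drug_types = ['Drug', 'Drug Class', 'Prodrug']
--     cleaned = [t.replace('"', '').strip() for t in compound_types.split(',')]
--     has_drug = any(t in drug_types for t in cleaned)
--     has_other = any(t not in drug_types for t in cleaned)
--     if has_drug and has_other: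
--         return 'dcs:ChemicalCompound,dcs:Drug'
--     if has_drug:
--         return 'dcid:Drug'
--     return 'dcid:ChemicalCompound'
-- ===== Notes on version B (the rewrite author's own statement) =====
-- stated objective: simpler
-- what changed: Replaces A's set accumulation with len/pop decision by a one-pass cleaning of the tokens followed by two boolean any-flags and direct branches.
import Mathlib
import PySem

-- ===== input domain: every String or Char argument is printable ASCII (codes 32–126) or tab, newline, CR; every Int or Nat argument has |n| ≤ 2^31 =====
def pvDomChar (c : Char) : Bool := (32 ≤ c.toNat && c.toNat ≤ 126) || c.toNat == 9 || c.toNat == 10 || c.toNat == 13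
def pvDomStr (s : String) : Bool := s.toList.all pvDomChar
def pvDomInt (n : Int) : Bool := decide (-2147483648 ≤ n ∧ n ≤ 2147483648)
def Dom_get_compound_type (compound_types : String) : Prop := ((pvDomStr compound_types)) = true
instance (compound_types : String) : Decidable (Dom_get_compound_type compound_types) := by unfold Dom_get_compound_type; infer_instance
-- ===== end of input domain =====

-- B cleans the tokens once, computes two any-flags and branches directly, instead of A's
-- set accumulation with a len/pop decision; objective: simpler.

-- ===== PORT A =====
def get_compound_type (compound_types : String) : String :=
  let drug_types : List String := ["Drug", "Drug Class", "Prodrug"]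
  -- s.split(',') with the nonempty literal separator: exact = PySem.Str.split? (sep ≠ "")
  let parts : List String := (PySem.Chars.splitOn compound_types.toList [',']).map String.ofList
  let types : PySem.Set String :=
    parts.foldl (fun types compound_type =>
      let compound_type := PySem.Str.strip (PySem.Str.replace compound_type "\"" "")
      if drug_types.contains compound_type then PySem.Set.add types "dcid:Drug"
      else PySem.Set.add types "dcid:ChemicalCompound") PySem.Set.empty
  if PySem.Set.len types == 2 then "dcs:ChemicalCompound,dcs:Drug"
  -- types.pop(): the set here always has exactly one element, which pop returns;
  -- the "" default is an unreachable totality guard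
  else List.headD types ""

-- ===== PORT B =====
def get_compound_type_alt (compound_types : String) : String :=
  let drug_types : List String := ["Drug", "Drug Class", "Prodrug"]
  let cleaned : List String :=
    ((PySem.Chars.splitOn compound_types.toList [',']).map String.ofList).map
      (fun t => PySem.Str.strip (PySem.Str.replace t "\"" ""))
  let has_drug := cleaned.any (fun t => drug_types.contains t)
  let has_other := cleaned.any (fun t => !drug_types.contains t)
  if has_drug && has_other then "dcs:ChemicalCompound,dcs:Drug"
  else if has_drug then "dcid:Drug"
  else "dcid:ChemicalCompound"

-- ===== PRECONDITION & SPEC =====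
def Spec_get_compound_type (compound_types : String) (out : String) : Prop := out = get_compound_type_alt compound_types
instance (compound_types : String) (out : String) : Decidable (Spec_get_compound_type compound_types out) := by unfold Spec_get_compound_type; infer_instance

-- ===== CLAIM (what is proved, stated in full; the proofs are below) =====
def Claim_equal_get_compound_type : Prop := ∀ (compound_types : String), Dom_get_compound_type compound_types → Spec_get_compound_type compound_types (get_compound_type compound_types)

-- ===== LEMMAS AND PROOFS =====

theorem splitOn_go_ne_nil (sep : List Char) (fuel : Nat) (l cur : List Char)
    (acc : List (List Char)) : PySem.Chars.splitOn.go sep fuel l cur acc ≠ [] := by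
  induction fuel generalizing l cur acc with
  | zero => simp [PySem.Chars.splitOn.go]
  | succ n ih =>
    cases l with
    | nil => simp [PySem.Chars.splitOn.go]
    | cons c rest =>
      rw [PySem.Chars.splitOn.go]
      split
      · exact ih _ _ _
      · exact ih _ _ _

theorem splitOn_ne_nil (s sep : List Char) : PySem.Chars.splitOn s sep ≠ [] :=
  splitOn_go_ne_nil sep _ s [] []

theorem nodup_all_eq {α : Type} (l : List α) (a : α) (hnd : l.Nodup) (hne : l ≠ [])
    (hall : ∀ x ∈ l, x = a) : l = [a] := by
  cases l with
  | nil => exact absurd rfl hne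
  | cons h t =>
    have hh : h = a := hall h (by simp)
    cases t with
    | nil => simp [hh]
    | cons h2 t2 =>
      have h2a : h2 = a := hall h2 (by simp)
      rw [List.nodup_cons] at hnd
      exact absurd (by simp [hh, h2a]) hnd.1

theorem fold_to_ofList_gen (parts : List String) (init : PySem.Set String) :
    parts.foldl (fun types compound_type =>
      let compound_type := PySem.Str.strip (PySem.Str.replace compound_type "\"" "")
      if (["Drug", "Drug Class", "Prodrug"] : List String).contains compound_type then
        PySem.Set.add types "dcid:Drug"
      else PySem.Set.add types "dcid:ChemicalCompound") init
    = ((parts.map (fun t => PySem.Str.strip (PySem.Str.replace t "\"" ""))).map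
          (fun t => if (["Drug", "Drug Class", "Prodrug"] : List String).contains t then
            "dcid:Drug" else "dcid:ChemicalCompound")).foldl PySem.Set.add init := by
  induction parts generalizing init with
  | nil => simp only [List.map_nil, List.foldl_nil]
  | cons h t ih =>
    simp only [List.map_cons, List.foldl_cons]
    rw [ih]
    generalize PySem.Str.strip (PySem.Str.replace h "\"" "") = c
    by_cases hc : (["Drug", "Drug Class", "Prodrug"] : List String).contains c = true
    · simp only [hc, if_true]
    · simp only [Bool.not_eq_true] at hc
      simp only [hc, Bool.false_eq_true, if_false]

theorem fold_to_ofList (parts : List String) :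
    parts.foldl (fun types compound_type =>
      let compound_type := PySem.Str.strip (PySem.Str.replace compound_type "\"" "")
      if (["Drug", "Drug Class", "Prodrug"] : List String).contains compound_type then
        PySem.Set.add types "dcid:Drug"
      else PySem.Set.add types "dcid:ChemicalCompound") PySem.Set.empty
    = PySem.Set.ofList
        ((parts.map (fun t => PySem.Str.strip (PySem.Str.replace t "\"" ""))).map
          (fun t => if (["Drug", "Drug Class", "Prodrug"] : List String).contains t then
            "dcid:Drug" else "dcid:ChemicalCompound")) := by
  rw [PySem.Set.ofList_eq_foldl]
  exact fold_to_ofList_gen parts PySem.Set.empty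

theorem core (cleaned : List String) (hne : cleaned ≠ []) :
    (if PySem.Set.len (PySem.Set.ofList (cleaned.map
        (fun t => if (["Drug", "Drug Class", "Prodrug"] : List String).contains t then
          "dcid:Drug" else "dcid:ChemicalCompound"))) == 2 then
      "dcs:ChemicalCompound,dcs:Drug"
    else List.headD (PySem.Set.ofList (cleaned.map
        (fun t => if (["Drug", "Drug Class", "Prodrug"] : List String).contains t then
          "dcid:Drug" else "dcid:ChemicalCompound"))) "")
    = (if cleaned.any (fun t => (["Drug", "Drug Class", "Prodrug"] : List String).contains t) &&
         cleaned.any (fun t => !(["Drug", "Drug Class", "Prodrug"] : List String).contains t) then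
        "dcs:ChemicalCompound,dcs:Drug"
      else if cleaned.any (fun t => (["Drug", "Drug Class", "Prodrug"] : List String).contains t) then
        "dcid:Drug"
      else "dcid:ChemicalCompound") := by
  set dt : List String := ["Drug", "Drug Class", "Prodrug"] with hdt
  set lab : String → String :=
    fun t => if dt.contains t then "dcid:Drug" else "dcid:ChemicalCompound" with hlab
  set L := cleaned.map lab with hL
  set S := PySem.Set.ofList L with hS
  have hmemS : ∀ y, y ∈ S ↔ y ∈ L := fun y => PySem.Set.mem_ofList L y
  have hnd : S.Nodup := PySem.Set.nodup_ofList L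
  have anyF : ∀ (p : String → Bool), cleaned.any p = false → ∀ t ∈ cleaned, p t = false := by
    intro p hp t ht
    cases hpt : p t with
    | false => rfl
    | true =>
      have h1 : cleaned.any p = true := List.any_eq_true.mpr ⟨t, ht, hpt⟩
      rw [hp] at h1
      cases h1
  cases hhd : cleaned.any (fun t => dt.contains t) with
  | false =>
    have hall : ∀ t ∈ cleaned, dt.contains t = false :=
      anyF _ hhd
    cases hho : cleaned.any (fun t => !dt.contains t) with
    | false =>
      exfalso
      cases hcl : cleaned with
      | nil => exact hne hcl
      | cons h t =>
        have h1 := anyF _ hho h (by rw [hcl]; simp)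
        have h2 := hall h (by rw [hcl]; simp)
        rw [h2] at h1
        cases h1
    | true =>
      have hallL : ∀ y ∈ L, y = "dcid:ChemicalCompound" := by
        intro y hy
        rcases List.mem_map.mp hy with ⟨t, ht, rfl⟩
        simp only [hlab]
        rw [hall t ht]
        simp
      have hSne : S ≠ [] := by
        cases hcl : cleaned with
        | nil => exact absurd hcl hne
        | cons h t =>
          intro h0
          have hmem : lab h ∈ L := by rw [hL, hcl]; exact List.mem_map_of_mem (by simp)
          have := (hmemS _).mpr hmem
          rw [h0] at this
          cases this
      have hSeq : S = ["dcid:ChemicalCompound"] :=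
        nodup_all_eq S _ hnd hSne (fun x hx => hallL x ((hmemS x).mp hx))
      rw [hSeq]
      simp [PySem.Set.len]
  | true =>
    rcases List.any_eq_true.mp hhd with ⟨t1, ht1, hc1⟩
    have hDmem : "dcid:Drug" ∈ L := by
      rw [hL]
      refine List.mem_map.mpr ⟨t1, ht1, ?_⟩
      simp only [hlab]
      rw [hc1]
      simp
    cases hho : cleaned.any (fun t => !dt.contains t) with
    | false =>
      have hall : ∀ t ∈ cleaned, dt.contains t = true := by
        intro t ht
        have := anyF _ hho t ht
        simp only [Bool.not_eq_false'] at this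
        exact this
      have hallL : ∀ y ∈ L, y = "dcid:Drug" := by
        intro y hy
        rcases List.mem_map.mp hy with ⟨t, ht, rfl⟩
        simp only [hlab]
        rw [hall t ht]
        simp
      have hSne : S ≠ [] := by
        intro h0
        have := (hmemS _).mpr hDmem
        rw [h0] at this
        cases this
      have hSeq : S = ["dcid:Drug"] :=
        nodup_all_eq S _ hnd hSne (fun x hx => hallL x ((hmemS x).mp hx))
      rw [hSeq]
      simp [PySem.Set.len]
    | true =>
      rcases List.any_eq_true.mp hho with ⟨t2, ht2, hc2⟩
      simp only [Bool.not_eq_true'] at hc2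
      have hCmem : "dcid:ChemicalCompound" ∈ L := by
        rw [hL]
        refine List.mem_map.mpr ⟨t2, ht2, ?_⟩
        simp only [hlab]
        rw [hc2]
        simp
      have hmem2 : ∀ y, y ∈ S ↔ (y = "dcid:Drug" ∨ y = "dcid:ChemicalCompound") := by
        intro y
        rw [hmemS]
        constructor
        · intro hy
          rcases List.mem_map.mp hy with ⟨t, ht, rfl⟩
          simp only [hlab]
          split
          · exact Or.inl rfl
          · exact Or.inr rfl
        · rintro (rfl | rfl)
          · exact hDmem
          · exact hCmem
      have hfin : S.toFinset = ({"dcid:Drug", "dcid:ChemicalCompound"} : Finset String) := by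
        ext y
        simp [List.mem_toFinset, hmem2 y]
      have hlen : S.length = 2 := by
        have h2 := List.toFinset_card_of_nodup hnd
        rw [hfin] at h2
        rw [← h2]
        decide
      have hb : (PySem.Set.len S == 2) = true := by
        simp [PySem.Set.len, hlen]
      rw [hb]
      simp

theorem get_compound_type_spec : Claim_equal_get_compound_type := by
  intro s _
  unfold Spec_get_compound_type get_compound_type get_compound_type_alt
  simp only []
  rw [fold_to_ofList]
  exact core _ (by simp [splitOn_ne_nil])
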